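-- pv_equiv track=rewrite | github.com/dandan1200/ai13308 | q4.py | task1
-- ===== SOURCE A (Python) =====
-- def task1(key, text, indicator):
--
--     if indicator == "d":
--         key = key[::-1]
--
--     for i in range(0,len(key),2):
--         key_from = key[i].lower()
--         key_to = key[i+1].lower()
--         key_from += key[i].upper()
--         key_to += key[i+1].upper()
--
--         temp = key_from
--         key_from += key_to
--         key_to += temp
--
--
--         translation_table = str.maketrans(key_from, key_to)
--
--         text = text.translate(translation_table)
--
--
--     return text
-- ===== SOURCE B (Python) =====
-- def task1(key, text, indicator):
--     if indicator == "d":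
--         key = key[::-1]
--     comp = {}
--     for i in range(0, len(key), 2):
--         a, b = key[i], key[i + 1]
--         step = {}
--         step[a.lower()] = b.lower()
--         step[a.upper()] = b.upper()
--         step[b.lower()] = a.lower()
--         step[b.upper()] = a.upper()
--         comp = {c: step.get(v, v) for c, v in comp.items()}
--         for c, v in step.items():
--             if c not in comp:
--                 comp[c] = v
--     return text.translate(str.maketrans(comp))
-- ===== Notes on version B (the rewrite author's own statement) =====
-- stated objective: faster
-- what changed: Instead of rebuilding a translation table and rewriting the whole text once per key pair, B composes all per-pair swap tables into one map (one dict-composition step per pair over a map bounded by the alphabet) and translates the text in a single pass.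
import Mathlib
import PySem

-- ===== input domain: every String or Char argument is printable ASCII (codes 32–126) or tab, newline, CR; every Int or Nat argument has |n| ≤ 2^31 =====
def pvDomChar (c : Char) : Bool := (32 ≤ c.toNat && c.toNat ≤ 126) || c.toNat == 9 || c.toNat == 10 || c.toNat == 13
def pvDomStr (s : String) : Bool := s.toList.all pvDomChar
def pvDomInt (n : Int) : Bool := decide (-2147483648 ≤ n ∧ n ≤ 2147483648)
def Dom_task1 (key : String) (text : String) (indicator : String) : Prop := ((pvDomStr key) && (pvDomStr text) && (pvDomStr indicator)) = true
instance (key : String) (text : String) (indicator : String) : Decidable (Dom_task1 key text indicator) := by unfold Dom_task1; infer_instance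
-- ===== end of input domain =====

-- B composes all per-pair swap tables into ONE translation map (one dict-composition pass
-- per pair over a small map) and translates the text in a single pass (objective: faster).

-- ===== PORT A =====
-- str.maketrans(from, to): a dict from[j] -> to[j], later entries overriding earlier ones
def pyMaketrans (f t : List Char) : PySem.Dict Char Char :=
  (f.zip t).foldl (fun d p => d.insert p.1 p.2) PySem.Dict.empty

-- str.translate(table): each char replaced by its table entry, unmapped chars kept
def pyTranslate (t : List Char) (d : PySem.Dict Char Char) : List Char :=
  t.map (fun c => d.getD c c)

def task1 (key : String) (text : String) (indicator : String) : String :=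
  let kl := if indicator == "d" then key.toList.reverse else key.toList
  let res := (PySem.List.pyRange 0 (kl.length : Int) 2).foldl (fun t i =>
    let ki := PySem.List.pyGetD kl i ' '        -- key[i]   (in range under Pre_)
    let ki1 := PySem.List.pyGetD kl (i+1) ' '   -- key[i+1] (in range under Pre_: even length)
    let key_from := [PySem.Chars.lowerChar ki]
    let key_to := [PySem.Chars.lowerChar ki1]
    let key_from := key_from ++ [PySem.Chars.upperChar ki]
    let key_to := key_to ++ [PySem.Chars.upperChar ki1]
    let temp := key_from
    let key_from := key_from ++ key_to
    let key_to := key_to ++ temp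
    pyTranslate t (pyMaketrans key_from key_to)) text.toList
  String.ofList res

-- ===== PORT B =====
-- the dict {a.lower(): b.lower(), a.upper(): b.upper(), b.lower(): a.lower(), b.upper(): a.upper()}
def mkStep (a b : Char) : PySem.Dict Char Char :=
  ((((PySem.Dict.empty).insert (PySem.Chars.lowerChar a) (PySem.Chars.lowerChar b)).insert
      (PySem.Chars.upperChar a) (PySem.Chars.upperChar b)).insert
      (PySem.Chars.lowerChar b) (PySem.Chars.lowerChar a)).insert
      (PySem.Chars.upperChar b) (PySem.Chars.upperChar a)

-- comp = {c: step.get(v, v) for c, v in comp.items()}  (keys of comp are unique, so the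
-- comprehension is exactly the same items list with rewritten values), then
-- for c, v in step.items(): if c not in comp: comp[c] = v
def composeStep (m s : PySem.Dict Char Char) : PySem.Dict Char Char :=
  let m' : PySem.Dict Char Char :=
    PySem.Dict.mk (m.items.map (fun p => (p.1, s.getD p.2 p.2)))
  s.items.foldl (fun d p => if d.contains p.1 then d else d.insert p.1 p.2) m'

def task1_alt (key : String) (text : String) (indicator : String) : String :=
  let kl := if indicator == "d" then key.toList.reverse else key.toList
  let comp := (PySem.List.pyRange 0 (kl.length : Int) 2).foldl (fun m i =>
    composeStep m (mkStep (PySem.List.pyGetD kl i ' ') (PySem.List.pyGetD kl (i+1) ' ')))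
    PySem.Dict.empty
  -- text.translate(str.maketrans(comp)): each char replaced by its comp entry, unmapped kept
  String.ofList (text.toList.map (fun c => comp.getD c c))

-- ===== PRECONDITION & SPEC =====
-- Pre_ excludes keys of odd length, on which Python's A (and B) raise IndexError at key[i+1].
def Pre_task1 (key : String) (text : String) (indicator : String) : Prop :=
  key.toList.length % 2 = 0
instance (key : String) (text : String) (indicator : String) : Decidable (Pre_task1 key text indicator) := by unfold Pre_task1; infer_instance

def pvWitness_task1 : String × String × String := ("ab", "Bach", "d")

def Spec_task1 (key : String) (text : String) (indicator : String) (out : String) : Prop := out = task1_alt key text indicator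
instance (key : String) (text : String) (indicator : String) (out : String) : Decidable (Spec_task1 key text indicator out) := by unfold Spec_task1; infer_instance

-- ===== CLAIM (what is proved, stated in full; the proofs are below) =====
def Claim_equal_task1 : Prop := ∀ (key : String) (text : String) (indicator : String), Dom_task1 key text indicator → Pre_task1 key text indicator → Spec_task1 key text indicator (task1 key text indicator)

-- ===== LEMMAS AND PROOFS =====

-- A's side: translating the text once per table equals mapping each character through the
-- list of tables (loop transposition)
theorem foldl_translate_eq_map_foldl (is : List Int) (f : Int → PySem.Dict Char Char)
    (t : List Char) :
    is.foldl (fun t i => pyTranslate t (f i)) t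
      = t.map (fun c => (is.map f).foldl (fun c s => PySem.Dict.getD s c c) c) := by
  induction is generalizing t with
  | nil => simp [List.map_id']
  | cons i is ih =>
    rw [List.foldl_cons, ih]
    simp [pyTranslate, List.map_map, List.foldl_cons]

-- the "insert the missing keys" loop, looked up: old keys read the accumulator, new keys
-- read the (nodup-keyed) list
theorem get?_foldl_insert_missing (l : List (Char × Char)) (m : PySem.Dict Char Char)
    (hl : (l.map (·.1)).Nodup) (c : Char) :
    (l.foldl (fun d p => if d.contains p.1 then d else d.insert p.1 p.2) m).get? c
      = if m.contains c then m.get? c else (PySem.Dict.mk l).get? c := by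
  induction l generalizing m with
  | nil =>
    simp only [List.foldl_nil]
    split
    · rfl
    · next h =>
      have h0 : m.get? c = none :=
        (PySem.Dict.get?_eq_none_iff_contains m c).mpr (by simpa using h)
      simp [h0]
      rfl
  | cons p l ih =>
    obtain ⟨k, v⟩ := p
    simp only [List.map_cons, List.nodup_cons] at hl
    rw [List.foldl_cons, ih _ hl.2, PySem.Dict.get?_mk_cons]
    by_cases hck : c = k
    · subst hck
      by_cases hmk : m.contains c
      · simp [hmk]
      · simp [hmk, PySem.Dict.contains_insert_self, PySem.Dict.get?_insert_self]
    · have h1 : (k == c) = false := by simp [Ne.symm hck]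
      by_cases hmk : m.contains k
      · simp [hmk, h1]
      · simp [hmk, h1, hck, PySem.Dict.contains_insert, PySem.Dict.get?_insert_of_ne _ _ hck]

-- the dict comprehension {c: g(v) for c, v in m.items()}, looked up
theorem get?_mk_map_values (l : List (Char × Char)) (g : Char → Char) (c : Char) :
    (PySem.Dict.mk (l.map (fun p => (p.1, g p.2)))).get? c
      = ((PySem.Dict.mk l).get? c).map g := by
  induction l with
  | nil => rfl
  | cons p l ih => rw [List.map_cons, PySem.Dict.get?_mk_cons, PySem.Dict.get?_mk_cons]
                   split <;> simp [ih]

-- composing one swap table onto the accumulated map composes the lookups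
theorem getD_composeStep (m s : PySem.Dict Char Char) (hs : s.keys.Nodup) (c : Char) :
    (composeStep m s).getD c c = s.getD (m.getD c c) (m.getD c c) := by
  unfold composeStep
  rw [PySem.Dict.getD_eq_get?_getD,
      get?_foldl_insert_missing _ _ hs,
      PySem.Dict.contains_eq_isSome_get?, get?_mk_map_values m.items (fun v => s.getD v v)]
  rcases h : m.get? c with _ | v
  · have hs' : (PySem.Dict.mk s.items) = s := rfl
    rw [hs']
    simp [h, PySem.Dict.getD_eq_get?_getD]
  · simp [h, PySem.Dict.getD_eq_get?_getD]

-- a step table is built by inserts, so its keys are unique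
theorem nodup_keys_mkStep (a b : Char) : (mkStep a b).keys.Nodup := by
  unfold mkStep
  exact PySem.Dict.nodup_keys_insert _ _ _
    (PySem.Dict.nodup_keys_insert _ _ _
      (PySem.Dict.nodup_keys_insert _ _ _
        (PySem.Dict.nodup_keys_insert _ _ _ PySem.Dict.nodup_keys_empty)))

-- B's side: folding the composed map over the range equals folding the individual tables
-- over each character
theorem getD_foldl_composeStep (is : List Int) (f : Int → PySem.Dict Char Char)
    (hf : ∀ i, (f i).keys.Nodup) (m : PySem.Dict Char Char) (c : Char) :
    (is.foldl (fun m i => composeStep m (f i)) m).getD c c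
      = (is.map f).foldl (fun c s => PySem.Dict.getD s c c) (m.getD c c) := by
  induction is generalizing m c with
  | nil => rfl
  | cons i is ih =>
    rw [List.foldl_cons, List.map_cons, List.foldl_cons, ih, getD_composeStep _ _ (hf i)]

theorem task1_eq_alt (key text indicator : String) :
    task1 key text indicator = task1_alt key text indicator := by
  unfold task1 task1_alt
  dsimp only
  rw [foldl_translate_eq_map_foldl]
  refine congrArg String.ofList (List.map_congr_left (fun c _ => ?_))
  rw [getD_foldl_composeStep _ _ (fun i => nodup_keys_mkStep _ _)]
  rfl

-- ===== VERDICT (by name: the statement is the Claim_ definition above) =====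
theorem task1_spec : Claim_equal_task1 := by
  intro key text indicator _ _
  unfold Spec_task1
  exact task1_eq_alt key text indicator
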